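-- pv_equiv track=rewrite | github.com/YingmingMa/PIMeval-PIMbench_Rowhammer | tests/test-H-add/H-add.py | h_add_nor
-- ===== SOURCE A (Python) =====
-- MASK = 0xFFFFFFFF
--
-- def h_add_nor(a: int, b: int) -> int:
--     MASK = 0xFFFFFFFF
--     a &= MASK
--     b &= MASK
--
--     g = ~(a | b) & MASK
--     p = ~(g | g) & MASK
--     p0 = p
--
--     i = 1
--     while i < 32:
--         g_shift = g << i & MASK
--         p_shift = p << i & MASK
--         g = ~ (g | (~ (g_shift | p))) & MASK
--         p = ~ (p_shift | p) & MASK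
--         i *= 2
--
--     g = g << 1 & MASK
--     g = ~ (g | p0) & MASK
--     return ~(g | g) & MASK
-- ===== SOURCE B (Python) =====
-- def h_add_nor(a: int, b: int) -> int:
--     # Same NOR prefix network, simulated bit-by-bit on LSB-first lists of 32
--     # booleans instead of word-wide masked integer operations.
--     MASK = 0xFFFFFFFF
--     a &= MASK
--     b &= MASK
--     x = [(a | b) >> j & 1 == 1 for j in range(32)]
--     g = [not v for v in x]
--     p = x[:]
--     for i in (1, 2, 4, 8, 16):
--         g, p = ([(not g[j]) and ((j >= i and g[j - i]) or p[j]) for j in range(32)],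
--                 [not ((j >= i and p[j - i]) or p[j]) for j in range(32)])
--     out = [(j >= 1 and g[j - 1]) or x[j] for j in range(32)]
--     return sum(1 << j for j in range(32) if out[j])
-- ===== Notes on version B (the rewrite author's own statement) =====
-- stated objective: alternative
-- what changed: The word-level NOR prefix network over masked big-int bitwise operations is replaced by an explicit per-bit simulation on LSB-first lists of 32 booleans, reassembling the integer from the output bits at the end.
import Mathlib
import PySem

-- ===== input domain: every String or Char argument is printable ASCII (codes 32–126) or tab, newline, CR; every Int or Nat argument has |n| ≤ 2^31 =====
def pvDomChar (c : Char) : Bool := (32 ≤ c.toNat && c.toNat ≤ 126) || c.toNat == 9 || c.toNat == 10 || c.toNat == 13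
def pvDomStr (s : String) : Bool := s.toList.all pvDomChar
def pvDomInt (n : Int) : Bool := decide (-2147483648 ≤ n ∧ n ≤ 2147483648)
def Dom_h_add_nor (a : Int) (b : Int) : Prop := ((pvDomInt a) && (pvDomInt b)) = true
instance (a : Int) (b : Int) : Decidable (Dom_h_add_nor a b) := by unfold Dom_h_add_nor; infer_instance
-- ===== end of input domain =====

-- B recomputes A's exact NOR prefix network bit-by-bit on boolean lists instead of
-- word-wide masked integer operations (objective: alternative structure, same cost).

-- ===== PORT A =====
-- Python's `i = 1; while i < 32: ...; i *= 2` as fuel recursion; fuel 6 covers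
-- every doubling step from the entry call's i = 1 (the guard only makes it total).
def hAddNorLoop : Nat → Int → Int → Nat → Int × Int
  | 0, g, p, _ => (g, p)
  | fuel+1, g, p, i =>
    if i < 32 then
      let gs : Int := PySem.Int.band (g <<< i) 0xFFFFFFFF
      let ps : Int := PySem.Int.band (p <<< i) 0xFFFFFFFF
      hAddNorLoop fuel
        (PySem.Int.band (Int.not (PySem.Int.bor g (Int.not (PySem.Int.bor gs p)))) 0xFFFFFFFF)
        (PySem.Int.band (Int.not (PySem.Int.bor ps p)) 0xFFFFFFFF)
        (i * 2)
    else (g, p)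

def h_add_nor (a : Int) (b : Int) : Int :=
  let a1 := PySem.Int.band a 0xFFFFFFFF
  let b1 := PySem.Int.band b 0xFFFFFFFF
  let g := PySem.Int.band (Int.not (PySem.Int.bor a1 b1)) 0xFFFFFFFF
  let p := PySem.Int.band (Int.not (PySem.Int.bor g g)) 0xFFFFFFFF
  let p0 := p
  let gp := hAddNorLoop 6 g p 1
  let g2 := PySem.Int.band (gp.1 <<< (1 : Nat)) 0xFFFFFFFF
  let g3 := PySem.Int.band (Int.not (PySem.Int.bor g2 p0)) 0xFFFFFFFF
  PySem.Int.band (Int.not (PySem.Int.bor g3 g3)) 0xFFFFFFFF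

-- ===== PORT B =====
-- one round of Source B's for-loop: both new bit lists from the old pair (g, p)
def hAddAltRound (gp : List Bool × List Bool) (i : Nat) : List Bool × List Bool :=
  ((List.range 32).map fun j =>
      (!(gp.1.getD j false)) && ((decide (i ≤ j) && gp.1.getD (j - i) false) || gp.2.getD j false),
   (List.range 32).map fun j =>
      !((decide (i ≤ j) && gp.2.getD (j - i) false) || gp.2.getD j false))

def h_add_nor_alt (a : Int) (b : Int) : Int :=
  let a1 := PySem.Int.band a 0xFFFFFFFF
  let b1 := PySem.Int.band b 0xFFFFFFFF
  let x := (List.range 32).map fun (j : Nat) =>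
      decide (PySem.Int.band (PySem.Int.bor a1 b1 >>> j) 1 = 1)
  let g0 := x.map (fun v => !v)
  let p0 := x
  let gp := [1, 2, 4, 8, 16].foldl hAddAltRound (g0, p0)
  let out := (List.range 32).map fun (j : Nat) =>
      (decide (1 ≤ j) && gp.1.getD (j - 1) false) || x.getD j false
  (((List.range 32).filter (fun j => out.getD j false)).map (fun (j : Nat) => (1 : Int) <<< j)).sum

-- ===== PRECONDITION & SPEC =====
def Spec_h_add_nor (a : Int) (b : Int) (out : Int) : Prop := out = h_add_nor_alt a b
instance (a : Int) (b : Int) (out : Int) : Decidable (Spec_h_add_nor a b out) := by unfold Spec_h_add_nor; infer_instance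

-- ===== CLAIM (what is proved, stated in full; the proofs are below) =====
def Claim_equal_h_add_nor : Prop := ∀ (a : Int) (b : Int), Dom_h_add_nor a b → Spec_h_add_nor a b (h_add_nor a b)

-- ===== LEMMAS AND PROOFS =====

-- the 32-bit mask as a Nat
def pvM : Nat := 2 ^ 32 - 1

-- the Nat that `a & 0xFFFFFFFF` evaluates to (the two reachable branches of PySem.Int.band)
def pvMask32 (a : Int) : Nat :=
  if 0 ≤ a then a.toNat &&& pvM else Nat.ldiff pvM (-a - 1).toNat

-- the A-side loop, after every signal has been reduced to a Nat
def pvNatLoop : Nat → Nat → Nat → Nat → Nat × Nat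
  | 0, g, p, _ => (g, p)
  | fuel+1, g, p, i =>
    if i < 32 then
      pvNatLoop fuel
        (Nat.ldiff (((g <<< i) &&& pvM) ||| p) g &&& pvM)
        (Nat.ldiff pvM (((p <<< i) &&& pvM) ||| p))
        (i * 2)
    else (g, p)

-- the low 32 bits of a Nat, as B's boolean list
def pvBits (w : Nat) : List Bool := (List.range 32).map (fun j => w.testBit j)

lemma pv_zero_ldiff (n : Nat) : Nat.ldiff 0 n = 0 := by
  apply Nat.eq_of_testBit_eq; intro i; simp [Nat.testBit_ldiff]

lemma pv_land_add_ldiff (m n : Nat) : (m &&& n) + Nat.ldiff m n = m := by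
  induction m using Nat.binaryRec generalizing n with
  | zero => simp [pv_zero_ldiff]
  | bit a m ih =>
    rw [← Nat.bit_testBit_zero_shiftRight_one n, Nat.land_bit, Nat.ldiff_bit,
      Nat.bit_val, Nat.bit_val, Nat.bit_val]
    have := ih (n >>> 1)
    cases a <;> cases n.testBit 0 <;> simp at * <;> omega

lemma pv_sub_land (m n : Nat) : m - (m &&& n) = Nat.ldiff m n := by
  have := pv_land_add_ldiff m n
  omega

lemma pv_testBit_M (j : Nat) : pvM.testBit j = decide (j < 32) :=
  Nat.testBit_two_pow_sub_one 32 j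

lemma pv_mask_int : (0xFFFFFFFF : Int) = ((pvM : Nat) : Int) := by norm_num [pvM]

lemma pv_not_cast (n : Nat) : Int.not ((n : Nat) : Int) = -(n : Int) - 1 := by
  cases n <;> simp [Int.not, Int.negSucc_eq] <;> ring_nf

lemma pv_not_not (x : Int) : Int.not (Int.not x) = x := by
  cases x <;> rfl

lemma pv_band_mask (a : Int) : PySem.Int.band a 0xFFFFFFFF = ((pvMask32 a : Nat) : Int) := by
  rw [pv_mask_int]
  unfold PySem.Int.band pvMask32
  split_ifs with h h2 h2
  · simp
  · exact absurd (by positivity) h2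
  · rw [Int.toNat_natCast, pv_sub_land]
  · exact absurd (by positivity) h2

lemma pv_band_mask_natCast (n : Nat) : PySem.Int.band ((n : Nat) : Int) 0xFFFFFFFF
    = ((n &&& pvM : Nat) : Int) := by
  rw [pv_mask_int, PySem.Int.band_natCast]

lemma pv_band_not (n : Nat) : PySem.Int.band (Int.not ((n : Nat) : Int)) 0xFFFFFFFF
    = ((Nat.ldiff pvM n : Nat) : Int) := by
  rw [pv_not_cast, pv_mask_int]
  unfold PySem.Int.band
  split_ifs with h h2 h2
  · omega
  · omega
  · have hh : (-(-(n:Int) - 1) - 1).toNat = n := by omega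
    rw [hh, Int.toNat_natCast, pv_sub_land]
  · exact absurd (by positivity) h2

lemma pv_bor_not (g m : Nat) : PySem.Int.bor ((g : Nat) : Int) (Int.not ((m : Nat) : Int))
    = Int.not ((Nat.ldiff m g : Nat) : Int) := by
  rw [pv_not_cast, pv_not_cast]
  unfold PySem.Int.bor
  split_ifs with h1 h2 h2
  · omega
  · have hh : (-(-(m:Int) - 1) - 1).toNat = m := by omega
    rw [hh, Int.toNat_natCast, pv_sub_land]
  · omega
  · omega

lemma pv_shiftLeft_cast (m i : Nat) : ((m : Nat) : Int) <<< i = ((m <<< i : Nat) : Int) := rfl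

lemma pv_shiftRight_cast (m i : Nat) : ((m : Nat) : Int) >>> i = ((m >>> i : Nat) : Int) := rfl

lemma pv_loop_cast : ∀ (fuel g p i : Nat),
    hAddNorLoop fuel ((g : Nat) : Int) ((p : Nat) : Int) i
      = ((((pvNatLoop fuel g p i).1 : Nat) : Int), (((pvNatLoop fuel g p i).2 : Nat) : Int))
  | 0, _, _, _ => rfl
  | fuel+1, g, p, i => by
    by_cases h : i < 32
    · rw [show hAddNorLoop (fuel+1) ((g : Nat) : Int) ((p : Nat) : Int) i
          = hAddNorLoop fuel
              (PySem.Int.band (Int.not (PySem.Int.bor ((g:Nat):Int)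
                 (Int.not (PySem.Int.bor (PySem.Int.band (((g:Nat):Int) <<< i) 0xFFFFFFFF) ((p:Nat):Int)))))
               0xFFFFFFFF)
              (PySem.Int.band (Int.not (PySem.Int.bor (PySem.Int.band (((p:Nat):Int) <<< i) 0xFFFFFFFF) ((p:Nat):Int))) 0xFFFFFFFF)
              (i * 2) from by simp [hAddNorLoop, h],
        show pvNatLoop (fuel+1) g p i
          = pvNatLoop fuel (Nat.ldiff (((g <<< i) &&& pvM) ||| p) g &&& pvM)
              (Nat.ldiff pvM (((p <<< i) &&& pvM) ||| p)) (i * 2) from by simp [pvNatLoop, h]]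
      rw [pv_shiftLeft_cast, pv_shiftLeft_cast, pv_band_mask_natCast, pv_band_mask_natCast,
        PySem.Int.bor_natCast, PySem.Int.bor_natCast, pv_bor_not, pv_not_not,
        pv_band_mask_natCast, pv_band_not]
      exact pv_loop_cast fuel _ _ _
    · simp [hAddNorLoop, pvNatLoop, h]

-- B's bit lists track the Nat signals of the A side, round for round
lemma pv_bits_getD (w j : Nat) (h : j < 32) : (pvBits w).getD j false = w.testBit j :=
  PySem.List.getD_map_range _ _ _ _ h

lemma pv_round (g p : Nat) (i : Nat) :
    hAddAltRound (pvBits g, pvBits p) i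
      = (pvBits (Nat.ldiff (((g <<< i) &&& pvM) ||| p) g &&& pvM),
         pvBits (Nat.ldiff pvM (((p <<< i) &&& pvM) ||| p))) := by
  unfold hAddAltRound
  refine Prod.ext ?_ ?_ <;> dsimp only <;>
    (conv_rhs => rw [show ∀ w, pvBits w = (List.range 32).map (fun j => w.testBit j) from fun _ => rfl]) <;>
    apply List.map_congr_left <;> intro j hj <;> rw [List.mem_range] at hj
  · rw [pv_bits_getD _ _ hj, pv_bits_getD _ _ hj, pv_bits_getD _ _ (by omega : j - i < 32)]
    simp [Nat.testBit_ldiff, Nat.testBit_shiftLeft, pv_testBit_M, hj]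
    cases g.testBit j <;> cases g.testBit (j-i) <;> cases p.testBit j <;>
      by_cases hij : i ≤ j <;> simp [hij]
  · rw [pv_bits_getD _ _ hj, pv_bits_getD _ _ (by omega : j - i < 32)]
    simp [Nat.testBit_ldiff, Nat.testBit_shiftLeft, pv_testBit_M, hj]

lemma pv_natLoop_step (fuel g p i : Nat) (h : i < 32) :
    pvNatLoop (fuel+1) g p i
      = pvNatLoop fuel (Nat.ldiff (((g <<< i) &&& pvM) ||| p) g &&& pvM)
          (Nat.ldiff pvM (((p <<< i) &&& pvM) ||| p)) (i * 2) := by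
  simp [pvNatLoop, h]

lemma pv_fold_rounds (g p : Nat) :
    [1, 2, 4, 8, 16].foldl hAddAltRound (pvBits g, pvBits p)
      = (pvBits (pvNatLoop 6 g p 1).1, pvBits (pvNatLoop 6 g p 1).2) := by
  rw [pv_natLoop_step 5 g p 1 (by norm_num), pv_natLoop_step 4 _ _ 2 (by norm_num),
    pv_natLoop_step 3 _ _ 4 (by norm_num), pv_natLoop_step 2 _ _ 8 (by norm_num),
    pv_natLoop_step 1 _ _ 16 (by norm_num)]
  norm_num [pvNatLoop]
  show hAddAltRound (hAddAltRound (hAddAltRound (hAddAltRound (hAddAltRound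
      (pvBits g, pvBits p) 1) 2) 4) 8) 16 = _
  rw [pv_round, pv_round, pv_round, pv_round, pv_round]

lemma pv_one_shiftLeft_int (k : Nat) : (1 : Int) <<< k = ((2 ^ k : Nat) : Int) := by
  rw [← Nat.one_shiftLeft]; rfl

-- the sum of 2^j over the set bits below k is the value mod 2^k
lemma pv_sum_bits (w : Nat) : ∀ (k : Nat),
    (((List.range k).filter (fun j => w.testBit j)).map (fun (j : Nat) => (1 : Int) <<< j)).sum
      = ((w % 2 ^ k : Nat) : Int)
  | 0 => by simp
  | k+1 => by
    rw [List.range_succ, List.filter_append, List.map_append, List.sum_append, pv_sum_bits w k]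
    have hmod : w % 2 ^ (k+1) = w % 2 ^ k + 2 ^ k * (w / 2 ^ k % 2) := Nat.mod_pow_succ
    have htb : w.testBit k = decide (w / 2 ^ k % 2 = 1) := by
      rcases Nat.mod_two_eq_zero_or_one (w / 2 ^ k) with hh | hh <;>
        simp [Nat.testBit, Nat.shiftRight_eq_div_pow, hh]
    by_cases h : w.testBit k
    · have h1 : w / 2 ^ k % 2 = 1 := by rw [htb] at h; exact of_decide_eq_true h
      simp [h, hmod, h1, pv_one_shiftLeft_int]
    · have h0 : w / 2 ^ k % 2 = 0 := by rw [htb] at h; simp at h; omega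
      simp [h, hmod, h0]

lemma pv_bits_eq (w : Nat) : (List.range 32).map (fun j => w.testBit j) = pvBits w := rfl

lemma pv_decide_bit (w j : Nat) :
    decide (PySem.Int.band (((w : Nat) : Int) >>> j) 1 = 1) = w.testBit j := by
  rw [pv_shiftRight_cast, show (1 : Int) = ((1 : Nat) : Int) from rfl, PySem.Int.band_natCast]
  rcases Nat.mod_two_eq_zero_or_one (w >>> j) with hh | hh <;>
    simp [Nat.testBit, Nat.and_one_is_mod, Nat.and_comm, hh]

lemma pv_map_not (w : Nat) : (pvBits w).map (fun v => !v) = pvBits (Nat.ldiff pvM w) := by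
  show ((List.range 32).map _).map _ = (List.range 32).map _
  rw [List.map_map]
  apply List.map_congr_left
  intro j hj
  rw [List.mem_range] at hj
  simp [Nat.testBit_ldiff, pv_testBit_M, hj]

lemma pv_p0 (w : Nat) :
    pvBits w = pvBits (Nat.ldiff pvM (Nat.ldiff pvM w ||| Nat.ldiff pvM w)) := by
  apply List.map_congr_left
  intro j hj
  rw [List.mem_range] at hj
  simp [Nat.testBit_ldiff, pv_testBit_M, hj]

lemma pv_out_list (gl p0 : Nat) :
    ((List.range 32).map fun j =>
        (decide (1 ≤ j) && (pvBits gl).getD (j - 1) false) || (pvBits p0).getD j false)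
      = pvBits (Nat.ldiff pvM (Nat.ldiff pvM (((gl <<< 1) &&& pvM) ||| p0)
          ||| Nat.ldiff pvM (((gl <<< 1) &&& pvM) ||| p0))) := by
  apply List.map_congr_left
  intro j hj
  rw [List.mem_range] at hj
  rw [pv_bits_getD _ _ hj, pv_bits_getD _ _ (by omega : j - 1 < 32)]
  simp [Nat.testBit_ldiff, Nat.testBit_shiftLeft, pv_testBit_M, hj]

lemma pv_high (m j : Nat) (h32 : 32 ≤ j) : (Nat.ldiff pvM m).testBit j = false := by
  simp [Nat.testBit_ldiff, pv_testBit_M]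
  omega

lemma pv_sum_out (w : Nat) (hw : ∀ j, 32 ≤ j → w.testBit j = false) :
    (((List.range 32).filter (fun j => (pvBits w).getD j false)).map
        (fun (j : Nat) => (1 : Int) <<< j)).sum = ((w : Nat) : Int) := by
  have hfc : ∀ j ∈ List.range 32, ((pvBits w).getD j false) = w.testBit j := by
    intro j hj
    rw [List.mem_range] at hj
    exact pv_bits_getD w j hj
  rw [List.filter_congr (q := fun j => w.testBit j) hfc, pv_sum_bits w 32,
    Nat.mod_eq_of_lt (Nat.lt_pow_two_of_testBit w hw)]

-- ===== VERDICT (by name: the statement is the Claim_ definition above) =====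
theorem h_add_nor_spec : Claim_equal_h_add_nor := by
  intro a b _
  unfold Spec_h_add_nor h_add_nor h_add_nor_alt
  rw [pv_band_mask a, pv_band_mask b]
  simp only [PySem.Int.bor_natCast, pv_band_not, pv_decide_bit, pv_bits_eq, pv_map_not]
  rw [pv_p0 (pvMask32 a ||| pvMask32 b)]
  rw [pv_fold_rounds, pv_out_list]
  simp only [pv_loop_cast, pv_shiftLeft_cast, pv_band_mask_natCast, PySem.Int.bor_natCast,
    pv_band_not]
  rw [pv_sum_out]
  intro j hj
  exact pv_high _ _ hj
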